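-- pv_equiv track=rewrite | github.com/jianershi/algorithm | 1824.1.py | getMaxOccurrences
-- ===== SOURCE A (Python) =====
-- def getMaxOccurrences(s, minLength, maxLength, maxUnique):
--     # write your code here
--     if not s or maxLength < 0 or maxUnique < 0 or len(s) < minLength:
--         return 0
--
--     minLength = max(1, minLength)
--
--     max_occurance = {}
--     unique_char = {}
--
--     n = len(s)
--
--     for i in range(minLength - 1):
--         unique_char[s[i]] = unique_char.get(s[i], 0) + 1
--
--     for left in range(n - minLength + 1):
--         right = left + minLength - 1
--         unique_char[s[right]] = unique_char.get(s[right], 0) + 1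
--         if len(unique_char) <= maxUnique:
--             substring = s[left: right + 1]
--             max_occurance[substring] = max_occurance.get(substring, 0) + 1
--         unique_char[s[left]] -= 1
--         if unique_char[s[left]] == 0:
--             del unique_char[s[left]]
--     return max(max_occurance.values()) if max_occurance else 0
-- ===== SOURCE B (Python) =====
-- def getMaxOccurrences(s, minLength, maxLength, maxUnique):
--     if not s or maxLength < 0 or maxUnique < 0 or len(s) < minLength:
--         return 0
--     m = max(1, minLength)
--     counts = {}
--     for i in range(len(s) - m + 1):
--         w = s[i:i + m]
--         if len(set(w)) <= maxUnique:
--             counts[w] = counts.get(w, 0) + 1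
--     return max(counts.values(), default=0)
-- ===== Notes on version B (the rewrite author's own statement) =====
-- stated objective: simpler
-- what changed: B drops A's incrementally-maintained character-count dictionary (prefix warm-up loop, per-step increment/decrement/delete) and instead tests each window directly with len(set(window)) in one plain counting pass, returning max(counts.values(), default=0).
import Mathlib
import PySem

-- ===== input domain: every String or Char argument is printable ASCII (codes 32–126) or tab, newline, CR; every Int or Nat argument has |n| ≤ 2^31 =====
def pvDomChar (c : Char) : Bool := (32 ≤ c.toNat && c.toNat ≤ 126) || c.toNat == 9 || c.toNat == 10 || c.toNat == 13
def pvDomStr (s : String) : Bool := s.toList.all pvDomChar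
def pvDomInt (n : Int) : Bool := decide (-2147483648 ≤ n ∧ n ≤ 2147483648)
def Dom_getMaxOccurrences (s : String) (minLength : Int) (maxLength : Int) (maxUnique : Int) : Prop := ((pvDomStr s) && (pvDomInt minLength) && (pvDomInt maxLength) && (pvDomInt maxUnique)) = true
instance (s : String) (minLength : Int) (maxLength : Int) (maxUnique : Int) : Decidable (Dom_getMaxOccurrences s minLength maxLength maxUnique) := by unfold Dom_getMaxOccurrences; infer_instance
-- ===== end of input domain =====

-- B replaces A's incrementally maintained character-count dictionary by a direct
-- per-window distinct-character test (one plain counting pass); objective: simpler.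

-- ===== PORT A =====
-- body of A's main loop; state = (max_occurance, unique_char)
def pvStepA (cs : List Char) (m maxUnique : Int)
    (st : PySem.Dict String Int × PySem.Dict Char Int) (left : Int) :
    PySem.Dict String Int × PySem.Dict Char Int :=
  let mo := st.1
  let uc := st.2
  let right := left + m - 1
  -- s[right], s[left]: the loop only calls this with the index in range
  let cr := PySem.List.pyGetD cs right ' '
  let uc := uc.insert cr (uc.getD cr 0 + 1)
  let mo := if (uc.size : Int) ≤ maxUnique then
      let substring := String.ofList (PySem.List.slice cs (some left) (some (right + 1)))
      mo.insert substring (mo.getD substring 0 + 1)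
    else mo
  let cl := PySem.List.pyGetD cs left ' '
  let uc := uc.insert cl (uc.getD cl 0 - 1)
  let uc := if uc.getD cl 0 = 0 then uc.erase cl else uc
  (mo, uc)

def getMaxOccurrences (s : String) (minLength : Int) (maxLength : Int) (maxUnique : Int) : Int :=
  let cs := s.toList
  if cs.length = 0 ∨ maxLength < 0 ∨ maxUnique < 0 ∨ (cs.length : Int) < minLength then 0
  else
    let m := max 1 minLength
    let n : Int := cs.length
    let uc0 := (PySem.List.pyRange 0 (m - 1) 1).foldl
        (fun d i =>
          let c := PySem.List.pyGetD cs i ' '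
          d.insert c (d.getD c 0 + 1)) PySem.Dict.empty
    let st := (PySem.List.pyRange 0 (n - m + 1) 1).foldl (pvStepA cs m maxUnique)
        (PySem.Dict.empty, uc0)
    if st.1.size ≠ 0 then (PySem.List.max? st.1.values (fun v => v)).getD 0 else 0

-- ===== PORT B =====
-- body of B's single counting loop
def pvStepB (cs : List Char) (m maxUnique : Int) (d : PySem.Dict String Int) (i : Int) :
    PySem.Dict String Int :=
  let w := String.ofList (PySem.List.slice cs (some i) (some (i + m)))
  if PySem.Set.len (PySem.Set.ofList w.toList) ≤ maxUnique then
    d.insert w (d.getD w 0 + 1)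
  else d

def getMaxOccurrences_alt (s : String) (minLength : Int) (maxLength : Int) (maxUnique : Int) : Int :=
  let cs := s.toList
  if cs.length = 0 ∨ maxLength < 0 ∨ maxUnique < 0 ∨ (cs.length : Int) < minLength then 0
  else
    let m := max 1 minLength
    let counts := (PySem.List.pyRange 0 ((cs.length : Int) - m + 1) 1).foldl
        (pvStepB cs m maxUnique) PySem.Dict.empty
    PySem.List.maxD counts.values (fun v => v) 0

-- ===== PRECONDITION & SPEC =====
def Spec_getMaxOccurrences (s : String) (minLength : Int) (maxLength : Int) (maxUnique : Int) (out : Int) : Prop := out = getMaxOccurrences_alt s minLength maxLength maxUnique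
instance (s : String) (minLength : Int) (maxLength : Int) (maxUnique : Int) (out : Int) : Decidable (Spec_getMaxOccurrences s minLength maxLength maxUnique out) := by unfold Spec_getMaxOccurrences; infer_instance

-- ===== CLAIM (what is proved, stated in full; the proofs are below) =====
def Claim_equal_getMaxOccurrences : Prop := ∀ (s : String) (minLength : Int) (maxLength : Int) (maxUnique : Int), Dom_getMaxOccurrences s minLength maxLength maxUnique → Spec_getMaxOccurrences s minLength maxLength maxUnique (getMaxOccurrences s minLength maxLength maxUnique)

-- ===== LEMMAS AND PROOFS =====

-- invariant of A's unique_char dictionary: it is exactly the character counter of the window w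
def pvInv (d : PySem.Dict Char Int) (w : List Char) : Prop :=
  d.keys.Nodup ∧ ∀ c : Char, d.get? c = if w.count c = 0 then none else some ((w.count c : Int))

theorem pvGet?_erase_self {κ ν : Type} [BEq κ] [LawfulBEq κ] (d : PySem.Dict κ ν) (k : κ) :
    (d.erase k).get? k = none := by
  
  simp only [PySem.Dict.get?, PySem.Dict.erase]
  rw [List.find?_eq_none.mpr]
  · rfl
  · intro x hx
    simp only [List.mem_filter, Bool.not_eq_eq_eq_not, Bool.not_true] at hx
    simp [hx.2]

theorem pvGet?_erase_of_ne {κ ν : Type} [BEq κ] [LawfulBEq κ] (d : PySem.Dict κ ν) (k k' : κ)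
    (hne : k' ≠ k) : (d.erase k).get? k' = d.get? k' := by
  
  simp only [PySem.Dict.get?, PySem.Dict.erase]
  congr 1
  induction d.items with
  | nil => rfl
  | cons p l ih =>
    by_cases hp : p.1 = k
    · have h1 : (p.1 == k) = true := by simp [hp]
      have h2 : (p.1 == k') = false := by simp [hp]; exact fun h => (h ▸ hne) rfl
      simp [h1, h2, ih]
    · have h1 : (p.1 == k) = false := by simp [hp]
      by_cases hp' : p.1 = k'
      · have h2 : (p.1 == k') = true := by simp [hp']
        simp [h1, h2]
      · have h2 : (p.1 == k') = false := by simp [hp']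
        simp [h1, h2, ih]

theorem pvNodup_keys_erase {κ ν : Type} [BEq κ] (d : PySem.Dict κ ν) (k : κ)
    (h : d.keys.Nodup) : (d.erase k).keys.Nodup := by
  
  have hs : ((d.items.filter (fun p => !p.1 == k)).map (fun p => p.1)).Sublist
      (d.items.map (fun p => p.1)) := (List.filter_sublist).map _
  exact hs.nodup h

theorem pvGetD_of_inv (d : PySem.Dict Char Int) (w : List Char) (h : pvInv d w) (c : Char) :
    d.getD c 0 = w.count c := by
  
  rw [PySem.Dict.getD_eq_get?_getD, h.2 c]
  by_cases hc : w.count c = 0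
  · simp [hc]
  · simp [hc]

theorem pvSize_of_inv (d : PySem.Dict Char Int) (w : List Char) (h : pvInv d w) :
    d.size = (PySem.Set.ofList w).length := by
  
  have hmem : ∀ a : Char, a ∈ d.keys ↔ a ∈ PySem.Set.ofList w := by
    intro a
    rw [PySem.Set.mem_ofList]
    constructor
    · intro ha
      by_contra hw
      have : d.get? a = none := by
        rw [h.2 a, if_pos (List.count_eq_zero.mpr hw)]
      exact (PySem.Dict.get?_eq_none_iff_not_mem_keys d a).mp this ha
    · intro hw
      by_contra hk
      have : d.get? a = none := (PySem.Dict.get?_eq_none_iff_not_mem_keys d a).mpr hk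
      rw [h.2 a] at this
      by_cases hz : w.count a = 0
      · exact (List.count_eq_zero.mp hz) hw
      · simp [hz] at this
  have hperm : d.keys.Perm (PySem.Set.ofList w) :=
    (List.perm_ext_iff_of_nodup h.1 (PySem.Set.nodup_ofList w)).mpr hmem
  have hlen := hperm.length_eq
  simpa [PySem.Dict.size, PySem.Dict.keys] using hlen

theorem pvInv_counter (l : List Char) : pvInv (PySem.Dict.counter l) l := by
  
  refine ⟨PySem.Dict.nodup_keys_counter l, fun c => ?_⟩
  by_cases hc : c ∈ l
  · have hcz : l.count c ≠ 0 := by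
      intro h; exact (List.count_eq_zero.mp h) hc
    cases hg : (PySem.Dict.counter l).get? c with
    | none =>
      exfalso
      have := (PySem.Dict.get?_eq_none_iff_not_mem_keys _ c).mp hg
      rw [PySem.Dict.keys_counter, PySem.Set.mem_ofList] at this
      exact this hc
    | some v =>
      have h1 : (PySem.Dict.counter l).getD c 0 = v :=
        PySem.Dict.getD_of_get?_eq_some _ 0 hg
      rw [PySem.Dict.getD_counter] at h1
      rw [if_neg hcz]
      exact congrArg some h1.symm
  · have hcz : l.count c = 0 := List.count_eq_zero.mpr hc
    rw [if_pos hcz]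
    rw [PySem.Dict.get?_eq_none_iff_not_mem_keys, PySem.Dict.keys_counter,
      PySem.Set.mem_ofList]
    exact hc

theorem pvMap_range_take (cs : List Char) (k : Nat) (hk : k ≤ cs.length) :
    (PySem.List.pyRange 0 (k : Int) 1).map (fun i => PySem.List.pyGetD cs i ' ') = cs.take k := by
  
  induction k with
  | zero => simp [PySem.List.pyRange_one_eq_nil (le_refl (0 : Int))]
  | succ k ih =>
    have hk' : k ≤ cs.length := Nat.le_of_succ_le hk
    have hcast : ((k + 1 : Nat) : Int) = (k : Int) + 1 := by push_cast; ring
    rw [hcast, PySem.List.pyRange_one_succ_right (by positivity), List.map_append,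
      ih hk', List.take_add_one]
    have hklt : (k : Int) < (cs.length : Int) := by exact_mod_cast hk
    have hget : PySem.List.pyGetD cs (k : Int) ' ' = cs[k] := by
      have := PySem.List.pyGetD_eq_getElem cs (i := (k : Int)) ' ' (by positivity) hklt
      simpa using this
    simp [hget, List.getElem?_eq_getElem (by omega : k < cs.length)]


theorem pvStepA_step (cs : List Char) (m maxU : Int) (hm : 1 ≤ m) (a : Int) (ha : 0 ≤ a)
    (hend : a + m ≤ (cs.length : Int)) (uc : PySem.Dict Char Int) (mo : PySem.Dict String Int)
    (hinv : pvInv uc ((cs.drop a.toNat).take (m.toNat - 1))) :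
    ∃ uc', pvStepA cs m maxU (mo, uc) a = (pvStepB cs m maxU mo a, uc') ∧
      pvInv uc' ((cs.drop (a + 1).toNat).take (m.toNat - 1)) := by
  have hlt0 : a.toNat < cs.length := by omega
  have hlt1 : a.toNat + (m.toNat - 1) < cs.length := by omega
  have hsplit : m.toNat = (m.toNat - 1) + 1 := by omega
  set cr := PySem.List.pyGetD cs (a + m - 1) ' ' with hcrdef
  set cl := PySem.List.pyGetD cs a ' ' with hcldef
  have hcr : cr = cs[a.toNat + (m.toNat - 1)]'hlt1 := by
    rw [hcrdef, PySem.List.pyGetD_eq_getElem cs ' ' (by omega)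
      (by exact_mod_cast (by omega : a + m - 1 < (cs.length : Int)))]
    exact getElem_congr_idx (by omega)
  have hcl : cl = cs[a.toNat]'hlt0 := by
    rw [hcldef, PySem.List.pyGetD_eq_getElem cs ' ' ha
      (by exact_mod_cast (by omega : a < (cs.length : Int)))]
  have hW_append : (cs.drop a.toNat).take m.toNat
      = (cs.drop a.toNat).take (m.toNat - 1) ++ [cr] := by
    conv_lhs => rw [hsplit]
    rw [List.take_add_one]
    congr 1
    rw [List.getElem?_drop, List.getElem?_eq_getElem hlt1, hcr]
    rfl
  have hW_cons : (cs.drop a.toNat).take m.toNat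
      = cl :: (cs.drop (a.toNat + 1)).take (m.toNat - 1) := by
    conv_lhs => rw [List.drop_eq_getElem_cons hlt0, hsplit, List.take_succ_cons]
    rw [hcl]
  have hslice : PySem.List.slice cs (some a) (some (a + m)) = (cs.drop a.toNat).take m.toNat := by
    rw [PySem.List.slice_toNat cs (by omega) (by omega)]
    congr 1
    omega
  set uc1 := uc.insert cr (uc.getD cr 0 + 1) with huc1
  have hinv1 : pvInv uc1 ((cs.drop a.toNat).take m.toNat) := by
    constructor
    · exact PySem.Dict.nodup_keys_insert _ _ _ hinv.1
    · intro c
      rw [huc1, PySem.Dict.get?_insert]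
      by_cases hc : c = cr
      · subst hc
        rw [if_pos rfl, pvGetD_of_inv uc _ hinv cr]
        have hcnt : ((cs.drop a.toNat).take m.toNat).count cr
            = ((cs.drop a.toNat).take (m.toNat - 1)).count cr + 1 := by
          rw [hW_append, List.count_append]
          simp
        rw [hcnt, if_neg (by omega)]
        exact congrArg some (by push_cast; ring)
      · rw [if_neg hc]
        have hcnt : ((cs.drop a.toNat).take m.toNat).count c
            = ((cs.drop a.toNat).take (m.toNat - 1)).count c := by
          rw [hW_append, List.count_append]
          simp [Ne.symm hc]
        rw [hcnt]
        exact hinv.2 c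
  have hsize1 : uc1.size = (PySem.Set.ofList ((cs.drop a.toNat).take m.toNat)).length :=
    pvSize_of_inv uc1 _ hinv1
  have hcnt_cl : ((cs.drop a.toNat).take m.toNat).count cl
      = ((cs.drop (a.toNat + 1)).take (m.toNat - 1)).count cl + 1 := by
    rw [hW_cons]
    simp
  have hcnt_ne : ∀ c, c ≠ cl → ((cs.drop a.toNat).take m.toNat).count c
      = ((cs.drop (a.toNat + 1)).take (m.toNat - 1)).count c := by
    intro c hc
    rw [hW_cons]
    simp [Ne.symm hc]
  set uc2 := uc1.insert cl (uc1.getD cl 0 - 1) with huc2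
  have hgd1 : uc1.getD cl 0 = (((cs.drop a.toNat).take m.toNat).count cl : Int) :=
    pvGetD_of_inv uc1 _ hinv1 cl
  have hval : uc1.getD cl 0 - 1
      = (((cs.drop (a.toNat + 1)).take (m.toNat - 1)).count cl : Int) := by
    rw [hgd1, hcnt_cl]; push_cast; ring
  have hgd2 : uc2.getD cl 0
      = (((cs.drop (a.toNat + 1)).take (m.toNat - 1)).count cl : Int) := by
    rw [huc2, PySem.Dict.getD_insert_self, hval]
  have hget2 : ∀ c, uc2.get? c = if c = cl
      then some (((cs.drop (a.toNat + 1)).take (m.toNat - 1)).count cl : Int)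
      else uc1.get? c := by
    intro c
    rw [huc2, PySem.Dict.get?_insert]
    by_cases hc : c = cl
    · rw [if_pos hc, if_pos hc, hval]
    · rw [if_neg hc, if_neg hc]
  have hP'eq : (a + 1).toNat = a.toNat + 1 := by omega
  refine ⟨if uc2.getD cl 0 = 0 then uc2.erase cl else uc2, ?_, ?_⟩
  · simp only [pvStepA, pvStepB]
    have harg : a + m - 1 + 1 = a + m := by ring
    rw [harg]
    have hcond : (((uc.insert cr (uc.getD cr 0 + 1)).size : Int) ≤ maxU)
        = (PySem.Set.len (PySem.Set.ofList
            (String.ofList (PySem.List.slice cs (some a) (some (a + m)))).toList) ≤ maxU) := by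
      rw [String.toList_ofList, hslice, ← huc1, hsize1]
      rfl
    simp only [← hcrdef, ← hcldef, hcond]
    rw [huc2, huc1]
  · rw [hP'eq]
    constructor
    · split
      · exact pvNodup_keys_erase _ _ (PySem.Dict.nodup_keys_insert _ _ _ hinv1.1)
      · exact PySem.Dict.nodup_keys_insert _ _ _ hinv1.1
    · intro c
      by_cases hz : uc2.getD cl 0 = 0
      · rw [if_pos hz]
        have hzc : ((cs.drop (a.toNat + 1)).take (m.toNat - 1)).count cl = 0 := by
          rw [hgd2] at hz; exact_mod_cast hz
        by_cases hc : c = cl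
        · subst hc
          rw [pvGet?_erase_self, if_pos hzc]
        · rw [pvGet?_erase_of_ne _ _ _ hc, hget2 c, if_neg hc, hinv1.2 c, hcnt_ne c hc]
      · rw [if_neg hz]
        have hzc : ((cs.drop (a.toNat + 1)).take (m.toNat - 1)).count cl ≠ 0 := by
          intro h0; rw [hgd2, h0] at hz; exact hz rfl
        by_cases hc : c = cl
        · subst hc
          rw [hget2 cl, if_pos rfl, if_neg hzc]
        · rw [hget2 c, if_neg hc, hinv1.2 c, hcnt_ne c hc]

theorem pvLoopA (cs : List Char) (m maxU : Int) (hm : 1 ≤ m) (_hmn : m ≤ (cs.length : Int)) :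
    ∀ (k : Nat) (a : Int), 0 ≤ a → ((cs.length : Int) - m + 1 - a).toNat = k →
    ∀ (uc : PySem.Dict Char Int) (mo : PySem.Dict String Int),
      pvInv uc ((cs.drop a.toNat).take (m.toNat - 1)) →
      ((PySem.List.pyRange a ((cs.length : Int) - m + 1) 1).foldl (pvStepA cs m maxU) (mo, uc)).1
        = (PySem.List.pyRange a ((cs.length : Int) - m + 1) 1).foldl (pvStepB cs m maxU) mo := by
  intro k
  induction k with
  | zero =>
    intro a ha hk uc mo hinv
    rw [PySem.List.pyRange_one_eq_nil (by omega)]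
    rfl
  | succ k ih =>
    intro a ha hk uc mo hinv
    have hab : a < (cs.length : Int) - m + 1 := by omega
    rw [PySem.List.pyRange_one_cons hab]
    simp only [List.foldl_cons]
    obtain ⟨uc', heq, hinv'⟩ := pvStepA_step cs m maxU hm a ha (by omega) uc mo hinv
    rw [heq]
    exact ih (a + 1) (by omega) (by omega) uc' (pvStepB cs m maxU mo a) hinv'

-- ===== VERDICT (by name: the statement is the Claim_ definition above) =====
theorem getMaxOccurrences_spec : Claim_equal_getMaxOccurrences := by
  intro s ml Ml mu _
  unfold Spec_getMaxOccurrences getMaxOccurrences getMaxOccurrences_alt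
  by_cases hg : s.toList.length = 0 ∨ Ml < 0 ∨ mu < 0 ∨ (s.toList.length : Int) < ml
  · simp only [if_pos hg]
  · simp only [if_neg hg]
    push Not at hg
    obtain ⟨hne, _, _, hml⟩ := hg
    have hm : 1 ≤ max 1 ml := le_max_left _ _
    have hmn : max 1 ml ≤ (s.toList.length : Int) := by
      have h1 : 1 ≤ (s.toList.length : Int) := by
        have := Nat.pos_of_ne_zero hne; exact_mod_cast this
      exact max_le h1 hml
    have hbase : pvInv ((PySem.List.pyRange 0 (max 1 ml - 1) 1).foldl
        (fun d i => d.insert (PySem.List.pyGetD s.toList i ' ')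
          (d.getD (PySem.List.pyGetD s.toList i ' ') 0 + 1)) PySem.Dict.empty)
        ((s.toList.drop (0 : Int).toNat).take ((max 1 ml).toNat - 1)) := by
      have hk : (max 1 ml).toNat - 1 ≤ s.toList.length := by omega
      have hfold : (PySem.List.pyRange 0 (max 1 ml - 1) 1).foldl
          (fun d i => d.insert (PySem.List.pyGetD s.toList i ' ')
            (d.getD (PySem.List.pyGetD s.toList i ' ') 0 + 1)) PySem.Dict.empty
          = PySem.Dict.counter (s.toList.take ((max 1 ml).toNat - 1)) := by
        rw [show max 1 ml - 1 = (((max 1 ml).toNat - 1 : Nat) : Int) from by omega,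
          ← PySem.Dict.foldl_insert_getD_add_one_eq_counter,
          ← pvMap_range_take s.toList ((max 1 ml).toNat - 1) hk, List.foldl_map]
      rw [hfold]
      simpa using pvInv_counter (s.toList.take ((max 1 ml).toNat - 1))
    have hmain := pvLoopA s.toList (max 1 ml) mu hm hmn
      (((s.toList.length : Int) - max 1 ml + 1 - 0).toNat) 0 le_rfl rfl _ PySem.Dict.empty hbase
    rw [hmain]
    set counts := (PySem.List.pyRange 0 ((s.toList.length : Int) - max 1 ml + 1) 1).foldl
      (pvStepB s.toList (max 1 ml) mu) PySem.Dict.empty with hcounts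
    by_cases hz : counts.size = 0
    · have hitems : counts.items = [] := List.length_eq_zero_iff.mp hz
      have hv : counts.values = [] := by simp [PySem.Dict.values, hitems]
      have hnone := (PySem.List.max?_eq_none_iff counts.values (fun v : Int => v)).mpr hv
      rw [if_neg (by simp [hz])]
      simp only [PySem.List.maxD]
      rw [hnone]
      rfl
    · rw [if_pos hz]
      rfl
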